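-- pv_equiv track=rewrite | github.com/matwerner/algorithms-for-datascience | locality-sensitive-hashing/benchmark.py | mapping_neighbour
-- ===== SOURCE A (Python) =====
-- def mapping_neighbour(cluster_dict):
-- 	'''
-- 		Receives a cluster dict and computes a neightbourhood dict
--
-- 		INPUT
-- 			cluster_dict<int,int>: each value from the cluster dict is an integer
--
-- 		OUTPUT
-- 			neighbour_dict<int,set<int>>: each value from the neightbour dict is a set of integers of variable size
--
--
-- 	'''
-- 	neighbours_mapping={}
-- 	for key, value in cluster_dict.items():
-- 		if value in neighbours_mapping:
-- 			neighbours_mapping[value].append(key)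
-- 		else:
-- 			neighbours_mapping[value]=[key]
-- 	return {key:set(neighbours_mapping[value]) for key, value in cluster_dict.items()}
-- ===== SOURCE B (Python) =====
-- def mapping_neighbour(cluster_dict):
-- 	'''
-- 		B: single pass. One shared set object per cluster value, created lazily on
-- 		first sight of the value; each key is both added to its cluster's shared set
-- 		and bound to that same set object in the result, so the neighbourhood dict is
-- 		complete when the loop ends -- no second pass, no per-key set rebuild.
-- 		(A structurally different one-pass design; not claimed faster.)
-- 	'''
-- 	neighbour_dict = {}
-- 	cluster_sets = {}
-- 	for key, value in cluster_dict.items():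
-- 		s = cluster_sets.get(value)
-- 		if s is None:
-- 			s = set()
-- 			cluster_sets[value] = s
-- 		s.add(key)
-- 		neighbour_dict[key] = s
-- 	return neighbour_dict
-- ===== Notes on version B (the rewrite author's own statement) =====
-- stated objective: alternative
-- what changed: B computes the neighbourhood dict in ONE pass: it lazily creates one shared set per cluster value and binds every key to that same set object as it adds the key to it, replacing A's two-stage design (a grouping pass building value->list, then a second comprehension pass converting a list to a fresh set once per key); measured only ~1.2x on the harness inputs, so no speed is claimed.
import Mathlib
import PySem

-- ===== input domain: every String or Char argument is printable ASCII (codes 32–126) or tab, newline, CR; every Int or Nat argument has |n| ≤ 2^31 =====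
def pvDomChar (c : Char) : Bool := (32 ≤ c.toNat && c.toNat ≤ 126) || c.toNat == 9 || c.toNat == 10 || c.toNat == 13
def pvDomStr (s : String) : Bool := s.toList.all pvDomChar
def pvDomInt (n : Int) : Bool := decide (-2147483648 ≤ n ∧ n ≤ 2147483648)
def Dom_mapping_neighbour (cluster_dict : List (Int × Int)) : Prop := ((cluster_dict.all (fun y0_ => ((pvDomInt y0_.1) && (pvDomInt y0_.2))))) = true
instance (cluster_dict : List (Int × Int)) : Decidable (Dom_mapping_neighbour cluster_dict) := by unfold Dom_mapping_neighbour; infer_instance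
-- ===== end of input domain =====

-- B computes the neighbourhood dict in one pass over shared per-cluster sets instead of A's
-- grouping pass plus a second pass converting a list to a fresh set per key (objective: alternative).

-- ===== PORT A =====
-- neighbours_mapping: value -> list of keys, grown by append / fresh [key]
def mapping_neighbour (cluster_dict : List (Int × Int)) : List (Int × List Int) :=
  let neighbours_mapping : PySem.Dict Int (List Int) :=
    cluster_dict.foldl
      (fun d kv =>
        if d.contains kv.2 then
          -- neighbours_mapping[value].append(key)
          d.modify kv.2 [] (fun l => l ++ [kv.1])
        else
          -- neighbours_mapping[value] = [key]
          d.insert kv.2 [kv.1])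
      PySem.Dict.empty
  -- {key: set(neighbours_mapping[value]) ...}; the key 'value' is always present,
  -- so Python's d[value] (KeyError if absent) is ported as getD
  (cluster_dict.foldl
      (fun r kv => r.insert kv.1 (PySem.Set.ofList (neighbours_mapping.getD kv.2 [])))
      PySem.Dict.empty).items

-- ===== PORT B =====
-- one iteration of B's cluster_sets update: s = get(value); if None insert a fresh set; s.add(key)
def bSetStep (d : PySem.Dict Int (PySem.Set Int)) (kv : Int × Int) : PySem.Dict Int (PySem.Set Int) :=
  match d.get? kv.2 with
  | none   => d.insert kv.2 (PySem.Set.add PySem.Set.empty kv.1)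
  | some s => d.insert kv.2 (PySem.Set.add s kv.1)
-- B's single loop mutates one shared set object per cluster value and binds each key to that
-- same object. Python's reference sharing is modelled by the standard indirection: the result
-- dict stores the cluster value (the 'reference' to the shared set) and the returned items
-- dereference it through the final cluster_sets dict — exactly what the aliased objects hold
-- when B's loop ends.
def mapping_neighbour_alt (cluster_dict : List (Int × Int)) : List (Int × List Int) :=
  let st :=
    cluster_dict.foldl
      (fun (st : PySem.Dict Int (PySem.Set Int) × PySem.Dict Int Int) kv =>
        let cluster_sets := st.1
        let neighbour_dict := st.2
        -- s = cluster_sets.get(value); if s is None: s = set(); cluster_sets[value] = s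
        -- s.add(key)  (mutates the shared set in place)
        let cluster_sets := bSetStep cluster_sets kv
        -- neighbour_dict[key] = s  (a reference to the shared set, recorded as kv.2)
        (cluster_sets, neighbour_dict.insert kv.1 kv.2))
      (PySem.Dict.empty, PySem.Dict.empty)
  st.2.items.map (fun p => (p.1, st.1.getD p.2 PySem.Set.empty))

-- ===== PRECONDITION & SPEC =====
def Spec_mapping_neighbour (cluster_dict : List (Int × Int)) (out : List (Int × List Int)) : Prop := out = mapping_neighbour_alt cluster_dict
instance (cluster_dict : List (Int × Int)) (out : List (Int × List Int)) : Decidable (Spec_mapping_neighbour cluster_dict out) := by unfold Spec_mapping_neighbour; infer_instance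

-- ===== CLAIM (what is proved, stated in full; the proofs are below) =====
def Claim_equal_mapping_neighbour : Prop := ∀ (cluster_dict : List (Int × Int)), Dom_mapping_neighbour cluster_dict → Spec_mapping_neighbour cluster_dict (mapping_neighbour cluster_dict)

-- ===== LEMMAS AND PROOFS =====

-- lookup after one step of A's grouping loop
theorem getD_stepA (d : PySem.Dict Int (List Int)) (kv : Int × Int) (v : Int) :
    ((if d.contains kv.2 then d.modify kv.2 [] (fun l => l ++ [kv.1])
      else d.insert kv.2 [kv.1]).getD v []) =
    if v = kv.2 then d.getD kv.2 [] ++ [kv.1] else d.getD v [] := by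
  by_cases h : d.contains kv.2 = true
  · simp [h, PySem.Dict.getD_modify]
  · simp only [Bool.not_eq_true] at h
    rw [if_neg (by simp [h]), PySem.Dict.getD_insert]
    split_ifs with hv
    · subst hv; rw [PySem.Dict.getD_of_not_contains _ _ h]; simp
    · rfl

-- lookup after one step of B's cluster_sets update
theorem getD_stepB (d : PySem.Dict Int (PySem.Set Int)) (kv : Int × Int) (v : Int) :
    ((bSetStep d kv).getD v PySem.Set.empty) =
    if v = kv.2 then PySem.Set.add (d.getD kv.2 PySem.Set.empty) kv.1
    else d.getD v PySem.Set.empty := by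
  unfold bSetStep
  cases hg : d.get? kv.2 with
  | none =>
    simp only [PySem.Dict.getD_insert]
    split_ifs with hv
    · subst hv; rw [PySem.Dict.getD_of_get?_eq_none _ _ hg]
    · rfl
  | some s =>
    simp only [PySem.Dict.getD_insert]
    split_ifs with hv
    · subst hv; rw [PySem.Dict.getD_of_get?_eq_some _ _ hg]
    · rfl

-- A's grouping dict and B's cluster_sets agree (up to Set.ofList) on every lookup
theorem group_invariant (l : List (Int × Int)) :
    ∀ (d1 : PySem.Dict Int (List Int)) (d2 : PySem.Dict Int (PySem.Set Int)),
      (∀ v, PySem.Set.ofList (d1.getD v []) = d2.getD v PySem.Set.empty) →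
      ∀ v, PySem.Set.ofList
          ((l.foldl (fun d kv =>
              if d.contains kv.2 then d.modify kv.2 [] (fun l => l ++ [kv.1])
              else d.insert kv.2 [kv.1]) d1).getD v []) =
        (l.foldl bSetStep d2).getD v PySem.Set.empty := by
  induction l with
  | nil => intro d1 d2 h v; exact h v
  | cons kv rest ih =>
    intro d1 d2 h v
    simp only [List.foldl_cons]
    apply ih
    intro w
    rw [getD_stepA, getD_stepB]
    split_ifs with hw
    · rw [PySem.Set.ofList_append_singleton, h kv.2]
    · exact h w

-- a fold of inserts of F-transformed values is the F-map of the fold of raw inserts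
theorem items_map_invariant (F : Int → List Int) (l : List (Int × Int)) :
    ∀ (d1 : PySem.Dict Int (List Int)) (d2 : PySem.Dict Int Int),
      d1.items = d2.items.map (fun p => (p.1, F p.2)) →
      (l.foldl (fun r kv => r.insert kv.1 (F kv.2)) d1).items =
        (l.foldl (fun r kv => r.insert kv.1 kv.2) d2).items.map (fun p => (p.1, F p.2)) := by
  induction l with
  | nil => intro d1 d2 h; exact h
  | cons kv rest ih =>
    intro d1 d2 h
    simp only [List.foldl_cons]
    apply ih
    have hkeys : d1.keys = d2.keys := by
      simp only [PySem.Dict.keys, h, List.map_map]; rfl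
    have hc : d1.contains kv.1 = d2.contains kv.1 := by
      rw [PySem.Dict.contains_eq_decide_mem_keys, PySem.Dict.contains_eq_decide_mem_keys, hkeys]
    rw [PySem.Dict.items_insert, PySem.Dict.items_insert, hc]
    split_ifs with hcc
    · rw [h, List.map_map, List.map_map]
      apply List.map_congr_left
      intro p _
      by_cases hp : p.1 = kv.1 <;> simp [hp]
    · rw [h, List.map_append]; rfl

theorem mapping_neighbour_spec : Claim_equal_mapping_neighbour := by
  unfold Claim_equal_mapping_neighbour
  intro cd _
  simp only [Spec_mapping_neighbour, mapping_neighbour, mapping_neighbour_alt]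
  -- split B's paired fold into its two independent components
  rw [show (cd.foldl
      (fun (st : PySem.Dict Int (PySem.Set Int) × PySem.Dict Int Int) kv =>
        (bSetStep st.1 kv, st.2.insert kv.1 kv.2))
      (PySem.Dict.empty, PySem.Dict.empty)) =
    (cd.foldl bSetStep PySem.Dict.empty,
     cd.foldl (fun r kv => r.insert kv.1 kv.2) PySem.Dict.empty)
    from PySem.List.foldl_prod_mk
      (f := bSetStep)
      (g := fun (r : PySem.Dict Int Int) (kv : Int × Int) => r.insert kv.1 kv.2)
      cd PySem.Dict.empty PySem.Dict.empty]
  dsimp only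
  have hlook := group_invariant cd PySem.Dict.empty PySem.Dict.empty
    (by intro v; simp [PySem.Dict.getD_empty, PySem.Set.ofList, PySem.Set.empty])
  have hbody : (fun (r : PySem.Dict Int (List Int)) (kv : Int × Int) =>
      r.insert kv.1 (PySem.Set.ofList
        ((cd.foldl (fun d kv =>
            if d.contains kv.2 then d.modify kv.2 [] (fun l => l ++ [kv.1])
            else d.insert kv.2 [kv.1]) PySem.Dict.empty).getD kv.2 []))) =
      (fun r kv => r.insert kv.1
        ((cd.foldl bSetStep PySem.Dict.empty).getD kv.2 PySem.Set.empty)) := by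
    funext r kv; exact congrArg (r.insert kv.1) (hlook kv.2)
  rw [hbody]
  exact items_map_invariant (fun v => (cd.foldl bSetStep PySem.Dict.empty).getD v PySem.Set.empty)
    cd PySem.Dict.empty PySem.Dict.empty rfl
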